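-- pv_equiv track=rewrite | github.com/peaciu29ernb/logslice | logslice/transform.py | apply_transforms
-- ===== SOURCE A (Python) =====
-- from typing import Any, Dict, List, Optional
--
-- def rename_fields(record: Dict[str, Any], mapping: Dict[str, str]) -> Dict[str, Any]:
--     """Return a new record with fields renamed according to mapping."""
--     result = {}
--     for key, value in record.items():
--         if key == "_raw":
--             result[key] = value
--         elif key in mapping:
--             result[mapping[key]] = value
--         else:
--             result[key] = value
--     return result
--
-- def drop_fields(record: Dict[str, Any], fields: List[str]) -> Dict[str, Any]:
--     """Return a new record with specified fields removed."""
--     return {k: v for k, v in record.items() if k not in fields or k == "_raw"}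
--
-- def keep_fields(record: Dict[str, Any], fields: List[str]) -> Dict[str, Any]:
--     """Return a new record keeping only specified fields (plus _raw)."""
--     kept = set(fields) | {"_raw"}
--     return {k: v for k, v in record.items() if k in kept}
--
-- def apply_transforms(
--     records,
--     rename: Optional[Dict[str, str]] = None,
--     drop: Optional[List[str]] = None,
--     keep: Optional[List[str]] = None,
-- ):
--     """Apply a chain of transformations to an iterable of records."""
--     for record in records:
--         if rename:
--             record = rename_fields(record, rename)
--         if drop:
--             record = drop_fields(record, drop)
--         if keep:
--             record = keep_fields(record, keep)
--         yield record
-- ===== SOURCE B (Python) =====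
-- def apply_transforms(records, rename=None, drop=None, keep=None):
--     """Single fused pass per record instead of chaining three dict-building helpers;
--     drop/keep membership sets are built once up front."""
--     drop_set = set(drop) if drop else set()
--     keep_set = set(keep) if keep else set()
--     for record in records:
--         if not rename and not drop and not keep:
--             yield record
--             continue
--         result = {}
--         for key, value in record.items():
--             nk = rename.get(key, key) if rename and key != "_raw" else key
--             if drop and nk in drop_set and nk != "_raw":
--                 continue
--             if keep and nk not in keep_set and nk != "_raw":
--                 continue
--             result[nk] = value
--         yield result
-- ===== Notes on version B (the rewrite author's own statement) =====
-- stated objective: faster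
-- what changed: B replaces A's chain of three dict-building helper passes (rename_fields, drop_fields, keep_fields, each materialising an intermediate dict, with drop doing a list scan per field and keep rebuilding its set for every record) with drop/keep membership sets built once up front and a single fused loop per record that renames the key, tests the renamed key against the sets, and writes into one result dict.
import Mathlib
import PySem

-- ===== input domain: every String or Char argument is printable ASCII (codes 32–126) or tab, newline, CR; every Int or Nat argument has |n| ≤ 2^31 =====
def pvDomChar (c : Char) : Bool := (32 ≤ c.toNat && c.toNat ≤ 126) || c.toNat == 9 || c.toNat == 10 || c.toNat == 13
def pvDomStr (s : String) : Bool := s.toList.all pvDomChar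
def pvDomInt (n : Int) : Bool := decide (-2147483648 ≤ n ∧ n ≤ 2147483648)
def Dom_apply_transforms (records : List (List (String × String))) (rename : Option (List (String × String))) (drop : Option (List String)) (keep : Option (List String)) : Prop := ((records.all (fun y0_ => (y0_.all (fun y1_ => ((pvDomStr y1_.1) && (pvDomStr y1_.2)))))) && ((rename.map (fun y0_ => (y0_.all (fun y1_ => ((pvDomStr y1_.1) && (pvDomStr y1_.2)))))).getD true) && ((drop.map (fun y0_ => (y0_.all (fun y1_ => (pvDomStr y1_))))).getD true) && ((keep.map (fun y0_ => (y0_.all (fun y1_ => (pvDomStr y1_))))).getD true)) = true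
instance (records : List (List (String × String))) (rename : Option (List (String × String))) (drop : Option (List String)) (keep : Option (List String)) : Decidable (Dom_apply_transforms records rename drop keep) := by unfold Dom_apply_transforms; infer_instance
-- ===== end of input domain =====

-- B fuses A's three chained dict-building helpers into one pass per record with drop/keep membership sets built once (objective: faster; a timing run measured B faster on large inputs).

-- ===== PORT A =====
def rename_fields (record : List (String × String)) (mapping : List (String × String)) : List (String × String) :=
  (record.foldl (fun (result : PySem.Dict String String) kv =>
      if kv.1 == "_raw" then result.insert kv.1 kv.2
      else if (PySem.Dict.mk mapping).contains kv.1 then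
        result.insert (((PySem.Dict.mk mapping).get? kv.1).getD kv.1) kv.2
      else result.insert kv.1 kv.2)
    PySem.Dict.empty).items

def drop_fields (record : List (String × String)) (fields : List String) : List (String × String) :=
  (record.foldl (fun (result : PySem.Dict String String) kv =>
      if !(fields.contains kv.1) || kv.1 == "_raw" then result.insert kv.1 kv.2 else result)
    PySem.Dict.empty).items

def keep_fields (record : List (String × String)) (fields : List String) : List (String × String) :=
  let kept : PySem.Set String := PySem.Set.union (PySem.Set.ofList fields) (PySem.Set.ofList ["_raw"])
  (record.foldl (fun (result : PySem.Dict String String) kv =>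
      if PySem.Set.contains kept kv.1 then result.insert kv.1 kv.2 else result)
    PySem.Dict.empty).items

def apply_transforms (records : List (List (String × String))) (rename : Option (List (String × String))) (drop : Option (List String)) (keep : Option (List String)) : List (List (String × String)) :=
  records.map (fun record =>
    let r1 := if rename.getD [] ≠ [] then rename_fields record (rename.getD []) else record
    let r2 := if drop.getD [] ≠ [] then drop_fields r1 (drop.getD []) else r1
    let r3 := if keep.getD [] ≠ [] then keep_fields r2 (keep.getD []) else r2
    r3)

-- ===== PORT B =====
def apply_transforms_alt (records : List (List (String × String))) (rename : Option (List (String × String))) (drop : Option (List String)) (keep : Option (List String)) : List (List (String × String)) :=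
  let rn := rename.getD []
  let dr := drop.getD []
  let kp := keep.getD []
  let dropSet : PySem.Set String := if dr ≠ [] then PySem.Set.ofList dr else PySem.Set.empty
  let keepSet : PySem.Set String := if kp ≠ [] then PySem.Set.ofList kp else PySem.Set.empty
  records.map (fun record =>
    if rn = [] ∧ dr = [] ∧ kp = [] then record
    else
      (record.foldl (fun (res : PySem.Dict String String) kv =>
          let nk := if rn ≠ [] ∧ kv.1 ≠ "_raw" then ((PySem.Dict.mk rn).get? kv.1).getD kv.1 else kv.1
          if dr ≠ [] ∧ PySem.Set.contains dropSet nk = true ∧ nk ≠ "_raw" then res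
          else if kp ≠ [] ∧ PySem.Set.contains keepSet nk = false ∧ nk ≠ "_raw" then res
          else res.insert nk kv.2)
        PySem.Dict.empty).items)

-- ===== PRECONDITION & SPEC =====
def Spec_apply_transforms (records : List (List (String × String))) (rename : Option (List (String × String))) (drop : Option (List String)) (keep : Option (List String)) (out : List (List (String × String))) : Prop := out = apply_transforms_alt records rename drop keep
instance (records : List (List (String × String))) (rename : Option (List (String × String))) (drop : Option (List String)) (keep : Option (List String)) (out : List (List (String × String))) : Decidable (Spec_apply_transforms records rename drop keep out) := by unfold Spec_apply_transforms; infer_instance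

-- ===== CLAIM (what is proved, stated in full; the proofs are below) =====
def Claim_equal_apply_transforms : Prop := ∀ (records : List (List (String × String))) (rename : Option (List (String × String))) (drop : Option (List String)) (keep : Option (List String)), Dom_apply_transforms records rename drop keep → Spec_apply_transforms records rename drop keep (apply_transforms records rename drop keep)

-- ===== LEMMAS AND PROOFS =====

-- The common shape of every per-record loop: insert (g key) value when P (g key), into an accumulator dict.
def pvFold (g : String → String) (P : String → Bool) (l : List (String × String)) (a : PySem.Dict String String) : PySem.Dict String String :=
  l.foldl (fun res kv => if P (g kv.1) then res.insert (g kv.1) kv.2 else res) a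

-- the key map A's rename stage applies
def gfn (m : List (String × String)) (k : String) : String :=
  if k = "_raw" then k else ((PySem.Dict.mk m).get? k).getD k

-- the key map of B's fused pass
def gB (rn : List (String × String)) (k : String) : String :=
  if rn ≠ [] ∧ k ≠ "_raw" then ((PySem.Dict.mk rn).get? k).getD k else k

def pDrop (fields : List String) (k : String) : Bool := !(fields.contains k) || k == "_raw"
def pKeep (fields : List String) (k : String) : Bool :=
  PySem.Set.contains (PySem.Set.union (PySem.Set.ofList fields) (PySem.Set.ofList ["_raw"])) k
def pd (dr : List String) (k : String) : Bool :=
  !(decide (dr ≠ [] ∧ PySem.Set.contains (if dr ≠ [] then PySem.Set.ofList dr else PySem.Set.empty) k = true ∧ k ≠ "_raw"))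
def pk (kp : List String) (k : String) : Bool :=
  !(decide (kp ≠ [] ∧ PySem.Set.contains (if kp ≠ [] then PySem.Set.ofList kp else PySem.Set.empty) k = false ∧ k ≠ "_raw"))

lemma pvFold_nodup (g : String → String) (P : String → Bool) (l : List (String × String))
    (a : PySem.Dict String String) (h : a.keys.Nodup) : (pvFold g P l a).keys.Nodup := by
  induction l generalizing a with
  | nil => exact h
  | cons kv t ih =>
    simp only [pvFold, List.foldl_cons]
    split
    · exact ih _ (PySem.Dict.nodup_keys_insert a _ kv.2 h)
    · exact ih _ h

-- filtering commutes with a single dict insert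
lemma filter_insert (a : PySem.Dict String String) (Q : String → Bool) (k : String) (v : String) :
    ((a.insert k v).items.filter (fun kv => Q kv.1))
    = if Q k then ((PySem.Dict.mk (a.items.filter (fun kv => Q kv.1))).insert k v).items
      else a.items.filter (fun kv => Q kv.1) := by
  by_cases hc : a.contains k = true
  · rw [PySem.Dict.items_insert_of_contains a v hc, List.filter_map]
    have hpt : ∀ p : String × String,
        ((fun kv : String × String => Q kv.1) ∘ (fun p => if (p.1 == k) = true then (k, v) else p)) p
        = Q p.1 := by
      intro p; by_cases h : p.1 = k <;> simp [h]
    by_cases hQ : Q k = true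
    · have hb : (PySem.Dict.mk (a.items.filter (fun kv => Q kv.1))).contains k = true := by
        rw [PySem.Dict.contains_iff_mem_keys]
        rcases (PySem.Dict.contains_iff_mem_keys a k).mp hc with hk
        simp only [PySem.Dict.keys, List.mem_map] at hk ⊢
        rcases hk with ⟨p, hp, hpk⟩
        exact ⟨p, by simp [List.mem_filter, hp, hpk, hQ], hpk⟩
      rw [PySem.Dict.items_insert_of_contains _ v hb, hQ]
      simp only [if_true]
      have : (fun p : String × String => ((fun kv : String × String => Q kv.1)
          ((fun p : String × String => if (p.1 == k) = true then (k, v) else p) p)))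
          = fun p : String × String => Q p.1 := funext hpt
      rw [List.filter_congr (fun p _ => hpt p)]
    · simp only [hQ, Bool.false_eq_true, if_false]
      rw [List.filter_congr (fun p _ => hpt p)]
      have hid : ∀ p ∈ a.items.filter (fun kv : String × String => Q kv.1),
          (fun p : String × String => if (p.1 == k) = true then (k, v) else p) p = id p := by
        intro p hp
        have hQp : Q p.1 = true := (List.mem_filter.mp hp).2
        have hne : p.1 ≠ k := by intro h; rw [h] at hQp; simp [hQp] at hQ
        simp [hne]
      exact (List.map_congr_left hid).trans (List.map_id _)
  · have hc' : a.contains k = false := by simpa using hc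
    rw [PySem.Dict.items_insert_of_not_contains a v hc', List.filter_append]
    by_cases hQ : Q k = true
    · have hb : (PySem.Dict.mk (a.items.filter (fun kv => Q kv.1))).contains k = false := by
        rw [← Bool.not_eq_true, PySem.Dict.contains_iff_mem_keys]
        intro hk
        simp only [PySem.Dict.keys, List.mem_map] at hk
        rcases hk with ⟨p, hp, hpk⟩
        have : k ∈ a.keys := by
          simp only [PySem.Dict.keys, List.mem_map]
          exact ⟨p, (List.mem_filter.mp hp).1, hpk⟩
        rw [← PySem.Dict.contains_iff_mem_keys] at this
        rw [this] at hc'; cases hc'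
      rw [PySem.Dict.items_insert_of_not_contains _ v hb]
      simp [hQ]
    · simp [hQ]

-- the fusion lemma: running the loop with an extra filter Q fused in, from a Q-filtered accumulator,
-- equals filtering the unfused loop's result by Q
lemma pvFold_filter (g : String → String) (P Q : String → Bool) (l : List (String × String))
    (a : PySem.Dict String String) :
    pvFold g (fun s => P s && Q s) l (PySem.Dict.mk (a.items.filter (fun kv => Q kv.1)))
    = PySem.Dict.mk ((pvFold g P l a).items.filter (fun kv => Q kv.1)) := by
  induction l generalizing a with
  | nil => rfl
  | cons kv t ih =>
    simp only [pvFold, List.foldl_cons] at *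
    by_cases hP : P (g kv.1) = true <;> by_cases hQ : Q (g kv.1) = true
    · have h2 := ih (a.insert (g kv.1) kv.2)
      rw [filter_insert a Q (g kv.1) kv.2] at h2
      simp only [hQ, if_true] at h2
      simpa [hP, hQ] using h2
    · have h2 := ih (a.insert (g kv.1) kv.2)
      rw [filter_insert a Q (g kv.1) kv.2] at h2
      simp only [hQ, Bool.false_eq_true, if_false] at h2
      simpa [hP, hQ] using h2
    · simpa [hP] using ih a
    · simpa [hP] using ih a

-- fusion specialised to the empty accumulator, items view
lemma compose2 (g : String → String) (P Q : String → Bool) (l : List (String × String)) :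
    (pvFold g (fun s => P s && Q s) l PySem.Dict.empty).items
    = ((pvFold g P l PySem.Dict.empty).items).filter (fun kv => Q kv.1) := by
  have h := pvFold_filter g P Q l PySem.Dict.empty
  have he : (PySem.Dict.mk ((PySem.Dict.empty : PySem.Dict String String).items.filter
      (fun kv => Q kv.1))) = (PySem.Dict.empty : PySem.Dict String String) := rfl
  rw [he] at h
  rw [h]

-- rebuilding a dup-free items list by unconditional inserts gives back the same list
lemma rebuild (l : List (String × String)) (h : (l.map (·.1)).Nodup) :
    (pvFold id (fun _ => true) l PySem.Dict.empty).items = l := by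
  have : (pvFold id (fun _ => true) l PySem.Dict.empty)
      = l.foldl (fun d p => d.insert p.1 p.2) PySem.Dict.empty := by
    simp [pvFold]
  rw [this, PySem.Dict.items_foldl_insert_fresh l (·.1) (·.2) PySem.Dict.empty
    (fun p _ => PySem.Dict.contains_empty p.1) h]
  simp [PySem.Dict.empty]

-- a filter stage run over a dup-free items list is List.filter
lemma stage_filter (l : List (String × String)) (Q : String → Bool) (h : (l.map (·.1)).Nodup) :
    (pvFold id Q l PySem.Dict.empty).items = l.filter (fun kv => Q kv.1) := by
  have hp : (fun s => (fun _ : String => true) s && Q s) = Q := by funext s; simp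
  have := compose2 id (fun _ => true) Q l
  rw [hp, rebuild l h] at this
  exact this

lemma nodup_items_fst (g : String → String) (P : String → Bool) (l : List (String × String)) :
    ((pvFold g P l PySem.Dict.empty).items.map (·.1)).Nodup :=
  pvFold_nodup g P l PySem.Dict.empty (by simp)

-- A's rename stage is pvFold with key map gfn and no filter
lemma rename_eq (record m : List (String × String)) :
    rename_fields record m = (pvFold (gfn m) (fun _ => true) record PySem.Dict.empty).items := by
  unfold rename_fields pvFold
  congr 1
  apply List.foldl_ext
  intro res kv _
  by_cases hraw : kv.1 = "_raw"
  · simp [hraw, gfn]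
  · by_cases hc : (PySem.Dict.mk m).contains kv.1 = true
    · simp [hraw, hc, gfn]
    · have hcf : (PySem.Dict.mk m).contains kv.1 = false := by
        rw [← Bool.not_eq_true]; exact hc
      have hnone : (PySem.Dict.mk m).get? kv.1 = none :=
        (PySem.Dict.get?_eq_none_iff_contains _ _).mpr hcf
      simp [hraw, hc, gfn, hnone]

lemma drop_eq (record : List (String × String)) (fields : List String) :
    drop_fields record fields = (pvFold id (pDrop fields) record PySem.Dict.empty).items := rfl

lemma keep_eq (record : List (String × String)) (fields : List String) :
    keep_fields record fields = (pvFold id (pKeep fields) record PySem.Dict.empty).items := rfl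

-- B's fused per-record loop is pvFold with key map gB and filter pd && pk
lemma alt_fold_eq (record rn : List (String × String)) (dr kp : List String) :
    (record.foldl (fun (res : PySem.Dict String String) kv =>
        let nk := if rn ≠ [] ∧ kv.1 ≠ "_raw" then ((PySem.Dict.mk rn).get? kv.1).getD kv.1 else kv.1
        if dr ≠ [] ∧ PySem.Set.contains (if dr ≠ [] then PySem.Set.ofList dr else PySem.Set.empty) nk = true ∧ nk ≠ "_raw" then res
        else if kp ≠ [] ∧ PySem.Set.contains (if kp ≠ [] then PySem.Set.ofList kp else PySem.Set.empty) nk = false ∧ nk ≠ "_raw" then res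
        else res.insert nk kv.2)
      PySem.Dict.empty)
    = pvFold (gB rn) (fun s => pd dr s && pk kp s) record PySem.Dict.empty := by
  unfold pvFold
  congr 1
  funext res kv
  simp only [gB, pd, pk]
  split_ifs <;> simp_all <;> tauto

lemma pd_of_ne (dr : List String) (h : dr ≠ []) : pd dr = pDrop dr := by
  funext k
  by_cases h1 : k ∈ dr <;> by_cases h2 : k = "_raw" <;>
    simp [pd, pDrop, h, h1, h2, PySem.Set.mem_ofList]

lemma pd_nil : pd [] = fun _ => true := by funext k; simp [pd]

lemma pk_of_ne (kp : List String) (h : kp ≠ []) : pk kp = pKeep kp := by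
  funext k
  by_cases h1 : k ∈ kp <;> by_cases h2 : k = "_raw" <;>
    simp [pk, pKeep, h, h1, h2, PySem.Set.mem_union, PySem.Set.mem_ofList]

lemma pk_nil : pk [] = fun _ => true := by funext k; simp [pk]

lemma gB_of_ne (rn : List (String × String)) (h : rn ≠ []) : gB rn = gfn rn := by
  funext k
  by_cases h2 : k = "_raw" <;> simp [gB, gfn, h, h2]

lemma gB_nil : gB [] = id := by funext k; simp [gB]

-- every per-record case: A's chain of stages equals B's single fused pass
lemma per_record (record rn : List (String × String)) (dr kp : List String) :
    (let r1 := if rn ≠ [] then rename_fields record rn else record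
     let r2 := if dr ≠ [] then drop_fields r1 dr else r1
     let r3 := if kp ≠ [] then keep_fields r2 kp else r2
     r3)
    = (if rn = [] ∧ dr = [] ∧ kp = [] then record
       else (pvFold (gB rn) (fun s => pd dr s && pk kp s) record PySem.Dict.empty).items) := by
  by_cases hr : rn = [] <;> by_cases hd : dr = [] <;> by_cases hk : kp = []
  · simp [hr, hd, hk]
  -- rn = [], dr = [], kp ≠ []
  · simp [hr, hd, hk]
    rw [keep_eq, gB_nil, pd_nil]
    have : (fun s => (fun _ : String => true) s && pk kp s) = pk kp := by funext s; simp
    rw [this, pk_of_ne kp hk]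
  -- rn = [], dr ≠ [], kp = []
  · simp [hr, hd, hk]
    rw [drop_eq, gB_nil, pk_nil]
    have : (fun s => pd dr s && (fun _ : String => true) s) = pd dr := by funext s; simp
    rw [this, pd_of_ne dr hd]
  -- rn = [], dr ≠ [], kp ≠ []
  · simp [hr, hd, hk]
    rw [drop_eq, keep_eq, gB_nil,
      stage_filter _ (pKeep kp) (nodup_items_fst id (pDrop dr) record),
      compose2 id (pd dr) (pk kp) record, pd_of_ne dr hd, pk_of_ne kp hk]
  -- rn ≠ [], dr = [], kp = []
  · simp [hr, hd, hk]
    rw [rename_eq, gB_of_ne rn hr, pd_nil, pk_nil]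
    have : (fun s => (fun _ : String => true) s && (fun _ : String => true) s)
        = (fun _ : String => true) := by funext s; simp
    rw [this]
  -- rn ≠ [], dr = [], kp ≠ []
  · simp [hr, hd, hk]
    rw [rename_eq, keep_eq, gB_of_ne rn hr, pd_nil,
      stage_filter _ (pKeep kp) (nodup_items_fst (gfn rn) (fun _ => true) record),
      compose2 (gfn rn) (fun _ => true) (pk kp) record, pk_of_ne kp hk]
  -- rn ≠ [], dr ≠ [], kp = []
  · simp [hr, hd, hk]
    rw [rename_eq, drop_eq, gB_of_ne rn hr, pk_nil,
      stage_filter _ (pDrop dr) (nodup_items_fst (gfn rn) (fun _ => true) record)]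
    have hp : (fun s => pd dr s && (fun _ : String => true) s)
        = fun s => (fun _ : String => true) s && pd dr s := by funext s; simp
    rw [hp, compose2 (gfn rn) (fun _ => true) (pd dr) record, pd_of_ne dr hd]
  -- rn ≠ [], dr ≠ [], kp ≠ []
  · simp [hr, hd, hk]
    rw [rename_eq, drop_eq, keep_eq, gB_of_ne rn hr,
      stage_filter _ (pDrop dr) (nodup_items_fst (gfn rn) (fun _ => true) record)]
    rw [stage_filter _ (pKeep kp)
      (by
        have hs : (((pvFold (gfn rn) (fun _ => true) record PySem.Dict.empty).items).filter
            (fun kv => pDrop dr kv.1)).Sublist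
            ((pvFold (gfn rn) (fun _ => true) record PySem.Dict.empty).items) :=
          List.filter_sublist
        exact List.Sublist.nodup (List.Sublist.map (·.1) hs)
          (nodup_items_fst (gfn rn) (fun _ => true) record))]
    rw [List.filter_filter]
    have hp : (fun s => pd dr s && pk kp s)
        = fun s => (fun _ : String => true) s && (pd dr s && pk kp s) := by funext s; simp
    rw [hp, compose2 (gfn rn) (fun _ => true) (fun s => pd dr s && pk kp s) record]
    rw [pd_of_ne dr hd, pk_of_ne kp hk]
    apply List.filter_congr
    intro p _
    simp [Bool.and_comm]

-- ===== VERDICT (by name: the statement is the Claim_ definition above) =====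
theorem apply_transforms_spec : Claim_equal_apply_transforms := by
  unfold Claim_equal_apply_transforms
  intro records rename drop keep _
  unfold Spec_apply_transforms apply_transforms apply_transforms_alt
  apply List.map_congr_left
  intro record _
  rw [alt_fold_eq record (rename.getD []) (drop.getD []) (keep.getD [])]
  exact per_record record (rename.getD []) (drop.getD []) (keep.getD [])
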